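-- pv_equiv track=rewrite | github.com/suvimh/essentia_playlist_generation_task | descriptor_based_app_suvi.py | get_key_scale_data
-- ===== SOURCE A (Python) =====
-- def get_key_scale_data(key_scale_profile):
--     #get data in key-scale - files
--     #only using edma key profile
--     key_dict = {}
--     for file, key_profile in key_scale_profile.items():
--         key =  key_profile['edma'][0]
--         scale = key_profile['edma'][1]
--         key_scale = f"{key} {scale}"
--         if key_scale not in key_dict:
--             key_dict[key_scale] = [file]
--         else:
--             key_dict[key_scale].append(file)
--     return key_dict
-- ===== SOURCE B (Python) =====
-- def get_key_scale_data(key_scale_profile):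
--     # group files by "key scale" (edma) via one pairing pass, a first-seen
--     # dedup of the key strings, and a per-key comprehension
--     pairs = [(f"{kp['edma'][0]} {kp['edma'][1]}", file)
--              for file, kp in key_scale_profile.items()]
--     keys = list(dict.fromkeys(k for k, _ in pairs))
--     return {k: [f for kk, f in pairs if kk == k] for k in keys}
-- ===== Notes on version B (the rewrite author's own statement) =====
-- stated objective: alternative
-- what changed: Replaces the incremental dict-building loop (membership test + create-or-append per item) with a declarative pipeline: one pass building (key_scale, file) pairs, a first-occurrence dedup of the keys, then one comprehension per key collecting its files.
import Mathlib
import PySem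

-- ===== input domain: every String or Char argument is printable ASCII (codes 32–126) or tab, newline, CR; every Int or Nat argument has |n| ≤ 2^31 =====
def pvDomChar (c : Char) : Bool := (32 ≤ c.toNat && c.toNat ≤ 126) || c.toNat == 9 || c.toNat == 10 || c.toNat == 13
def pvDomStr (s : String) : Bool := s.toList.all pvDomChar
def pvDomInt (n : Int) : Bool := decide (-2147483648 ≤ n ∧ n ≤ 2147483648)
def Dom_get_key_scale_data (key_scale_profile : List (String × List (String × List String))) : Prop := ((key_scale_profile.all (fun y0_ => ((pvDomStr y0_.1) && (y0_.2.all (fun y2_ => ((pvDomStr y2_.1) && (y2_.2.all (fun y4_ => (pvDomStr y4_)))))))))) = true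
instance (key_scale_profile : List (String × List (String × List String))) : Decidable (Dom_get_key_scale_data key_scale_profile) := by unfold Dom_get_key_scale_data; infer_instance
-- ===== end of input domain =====

-- B replaces A's incremental dict-building loop by a pairing pass, a first-seen key dedup
-- and a per-key comprehension (alternative decomposition, not claimed faster).

-- shared helper: the f"{kp['edma'][0]} {kp['edma'][1]}" expression both Pythons compute
def pvKeyOf (p : String × List (String × List String)) : String :=
  let edma := (PySem.Dict.mk p.2).getD "edma" []
  (PySem.List.pyGetD edma 0 "") ++ " " ++ (PySem.List.pyGetD edma 1 "")

-- ===== PORT A =====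
def get_key_scale_data (key_scale_profile : List (String × List (String × List String))) : List (String × List String) :=
  (key_scale_profile.foldl
    (fun key_dict p =>
      let key_scale := pvKeyOf p
      if key_dict.contains key_scale = false then
        key_dict.insert key_scale [p.1]
      else
        key_dict.insert key_scale (key_dict.getD key_scale [] ++ [p.1]))
    PySem.Dict.empty).items

-- ===== PORT B =====
def get_key_scale_data_alt (key_scale_profile : List (String × List (String × List String))) : List (String × List String) :=
  let pairs := key_scale_profile.map (fun p => (pvKeyOf p, p.1))
  let keys := PySem.Set.ofList (pairs.map Prod.fst)   -- list(dict.fromkeys(...)): distinct keys, first-seen order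
  keys.map (fun k => (k, (pairs.filter (fun q => q.1 == k)).map (fun q => q.2)))

-- ===== PRECONDITION & SPEC =====
-- Pre_ excludes profiles where A raises (no 'edma' key → KeyError, or fewer than two entries
-- under it → IndexError) and, per the dict-as-association-list convention, lists with duplicate
-- outer or inner keys, which cannot arise from a Python dict.
def Pre_get_key_scale_data (key_scale_profile : List (String × List (String × List String))) : Prop :=
  (key_scale_profile.map Prod.fst).Nodup ∧
  ∀ p ∈ key_scale_profile,
    (p.2.map Prod.fst).Nodup ∧
    "edma" ∈ p.2.map Prod.fst ∧
    2 ≤ ((PySem.Dict.mk p.2).getD "edma" []).length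
instance (key_scale_profile : List (String × List (String × List String))) : Decidable (Pre_get_key_scale_data key_scale_profile) := by unfold Pre_get_key_scale_data; infer_instance
def pvWitness_get_key_scale_data : (List (String × List (String × List String))) :=
  [("a.mp3", [("edma", ["C", "major"])]), ("b.mp3", [("edma", ["C", "major"])]), ("c.mp3", [("edma", ["D", "minor"])])]

def Spec_get_key_scale_data (key_scale_profile : List (String × List (String × List String))) (out : List (String × List String)) : Prop := out = get_key_scale_data_alt key_scale_profile
instance (key_scale_profile : List (String × List (String × List String))) (out : List (String × List String)) : Decidable (Spec_get_key_scale_data key_scale_profile out) := by unfold Spec_get_key_scale_data; infer_instance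

-- ===== CLAIM (what is proved, stated in full; the proofs are below) =====
def Claim_equal_get_key_scale_data : Prop := ∀ (key_scale_profile : List (String × List (String × List String))), Dom_get_key_scale_data key_scale_profile → Pre_get_key_scale_data key_scale_profile → Spec_get_key_scale_data key_scale_profile (get_key_scale_data key_scale_profile)

-- ===== LEMMAS AND PROOFS =====

-- A's loop body is Dict.modify with default []
theorem pvStep_eq_modify (d : PySem.Dict String (List String)) (p : String × List (String × List String)) :
    (let key_scale := pvKeyOf p
     if d.contains key_scale = false then d.insert key_scale [p.1]
     else d.insert key_scale (d.getD key_scale [] ++ [p.1]))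
    = d.modify (pvKeyOf p) [] (fun v => v ++ [p.1]) := by
  by_cases h : d.contains (pvKeyOf p) = true
  · simp [h, PySem.Dict.modify]
  · have h' : d.contains (pvKeyOf p) = false := by simpa using h
    simp [h', PySem.Dict.modify, PySem.Dict.getD_of_not_contains d ([] : List String) h']

theorem get_key_scale_data_eq (xs : List (String × List (String × List String))) :
    get_key_scale_data xs = get_key_scale_data_alt xs := by
  unfold get_key_scale_data get_key_scale_data_alt
  have hfold :
      xs.foldl
        (fun key_dict p =>
          let key_scale := pvKeyOf p
          if key_dict.contains key_scale = false then
            key_dict.insert key_scale [p.1]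
          else
            key_dict.insert key_scale (key_dict.getD key_scale [] ++ [p.1]))
        PySem.Dict.empty
      = (xs.map (fun p => (pvKeyOf p, p.1))).foldl
          (fun d q => d.modify q.1 [] (fun v => v ++ [q.2])) PySem.Dict.empty := by
    rw [List.foldl_map]
    exact List.foldl_ext _ _ _ (fun d p _ => pvStep_eq_modify d p)
  rw [hfold]
  set l := xs.map (fun p => (pvKeyOf p, p.1)) with hl
  set D := l.foldl (fun d q => d.modify q.1 [] (fun v => v ++ [q.2])) PySem.Dict.empty with hD
  have hkeys : D.keys = PySem.Set.ofList (l.map Prod.fst) := by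
    rw [hD]
    have := PySem.Dict.keys_foldl_modify_key l Prod.fst ([] : List String)
      (fun _ q => (fun v => v ++ [q.2])) PySem.Dict.empty
    simpa [PySem.Set.update_nil_left, PySem.Dict.keys_empty] using this
  have hnd : D.keys.Nodup := by
    rw [hD]
    exact PySem.Dict.nodup_keys_foldl_modify_key l Prod.fst ([] : List String)
      (fun _ q => (fun v => v ++ [q.2])) PySem.Dict.empty (by simp [PySem.Dict.keys_empty])
  have hgetD : ∀ k, D.getD k [] = (l.filter (fun q => q.1 == k)).map (fun q => q.2) := by
    intro k
    rw [hD]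
    simpa [PySem.Dict.getD_empty] using
      PySem.Dict.getD_foldl_modify_append l PySem.Dict.empty k
  calc D.items = D.keys.map (fun k => (k, D.getD k [])) :=
        PySem.Dict.items_eq_map_keys D hnd []
    _ = (PySem.Set.ofList (l.map Prod.fst)).map
          (fun k => (k, (l.filter (fun q => q.1 == k)).map (fun q => q.2))) := by
        rw [hkeys]; exact List.map_congr_left (fun k _ => by rw [hgetD k])

-- ===== VERDICT (by name: the statement is the Claim_ definition above) =====
theorem get_key_scale_data_spec : Claim_equal_get_key_scale_data := by
  intro xs _ _
  unfold Spec_get_key_scale_data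
  exact get_key_scale_data_eq xs
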